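-- pv_equiv track=rewrite | github.com/981377660LMT/algorithm-study | 11_动态规划/Equal Piles.py | solve
-- ===== SOURCE A (Python) =====
-- def solve(nums):
--     nums = sorted(nums)
--     res = 0
--     depth = 0
--     for pre, cur in zip(nums, nums[1:]):
--         if pre != cur:
--             depth += 1
--         res += depth
--     return res
-- ===== SOURCE B (Python) =====
-- from bisect import bisect_left
--
-- def solve(nums):
--     # Rank-sum formulation: each element contributes the number of distinct
--     # values strictly below it; that rank is found by binary search in the
--     # sorted list of distinct values, no scan of the sorted full list.
--     distinct = sorted(set(nums))
--     return sum(bisect_left(distinct, x) for x in nums)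
-- ===== Notes on version B (the rewrite author's own statement) =====
-- stated objective: alternative
-- what changed: Replaces A's scan of the fully sorted list with a running adjacency depth-counter by deduplicating into a set, sorting only the distinct values, and summing each element's rank obtained by binary search (bisect_left) in that distinct list.
import Mathlib
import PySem

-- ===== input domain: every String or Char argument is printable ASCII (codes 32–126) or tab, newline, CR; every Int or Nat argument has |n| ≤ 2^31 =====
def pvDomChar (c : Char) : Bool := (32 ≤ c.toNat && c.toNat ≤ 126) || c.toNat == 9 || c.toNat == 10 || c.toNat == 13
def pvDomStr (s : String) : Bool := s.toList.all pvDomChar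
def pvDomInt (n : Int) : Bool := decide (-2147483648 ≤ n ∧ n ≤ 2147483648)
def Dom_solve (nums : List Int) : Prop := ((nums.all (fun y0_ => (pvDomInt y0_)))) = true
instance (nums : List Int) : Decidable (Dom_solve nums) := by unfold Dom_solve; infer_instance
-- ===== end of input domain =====

-- B never scans the sorted full list: it sorts only the distinct values (a set) and sums
-- each element's rank found by binary search there (an alternative rank-sum algorithm).

-- ===== PORT A =====
-- the for-loop over zip(nums, nums[1:]) with state (depth, res)
def solveLoop : List (Int × Int) → Int → Int → Int
  | [], _, res => res
  | (pre, cur) :: rest, depth, res =>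
      let d := if pre ≠ cur then depth + 1 else depth
      solveLoop rest d (res + d)

def solve (nums : List Int) : Int :=
  let s := PySem.List.sorted nums (fun x => x) false
  solveLoop (s.zip (PySem.List.slice s (some 1) none)) 0 0

-- ===== PORT B =====
-- sorted(set(nums)): the distinct values in increasing order
def distinctSorted (nums : List Int) : List Int :=
  PySem.List.sorted (PySem.Set.ofList nums) (fun x => x) false

-- sum(bisect_left(distinct, x) for x in nums)
def solve_alt (nums : List Int) : Int :=
  let distinct := distinctSorted nums
  (nums.map (fun x => (PySem.List.bisectLeft distinct x : Int))).sum

-- ===== PRECONDITION & SPEC =====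
def Spec_solve (nums : List Int) (out : Int) : Prop := out = solve_alt nums
instance (nums : List Int) (out : Int) : Decidable (Spec_solve nums out) := by unfold Spec_solve; infer_instance

-- ===== CLAIM (what is proved, stated in full; the proofs are below) =====
def Claim_equal_solve : Prop := ∀ (nums : List Int), Dom_solve nums → Spec_solve nums (solve nums)

-- ===== LEMMAS AND PROOFS =====

-- number of distinct values of the set S strictly below x (the rank of x)
def cnt (S : Finset Int) (x : Int) : Nat := (S.filter (fun v => v < x)).card

theorem solveLoop_shift (l : List (Int × Int)) : ∀ d res, solveLoop l d res = res + solveLoop l d 0 := by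
  induction l with
  | nil => intro d res; simp [solveLoop]
  | cons p rest ih =>
      intro d res
      obtain ⟨pre, cur⟩ := p
      simp only [solveLoop]
      rw [ih, ih ((if pre ≠ cur then d + 1 else d)) ((0 : Int) + _)]
      ring

theorem solveLoop_depth (t : List Int) : ∀ x d, solveLoop ((x :: t).zip t) d 0 = d * t.length + solveLoop ((x :: t).zip t) 0 0 := by
  induction t with
  | nil => intro x d; simp [solveLoop]
  | cons y t' ih =>
      intro x d
      simp only [List.zip_cons_cons, solveLoop]
      by_cases h : x = y
      · simp only [h, ne_eq, not_true_eq_false, if_false, zero_add]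
        rw [solveLoop_shift _ d, ih y d]
        simp only [List.length_cons]; push_cast; ring
      · simp only [ne_eq, h, not_false_eq_true, if_true, zero_add]
        rw [solveLoop_shift _ (d + 1), ih y (d + 1), solveLoop_shift _ 1 1, ih y 1]
        simp only [List.length_cons]; push_cast; ring

-- the rank of the minimum is 0
theorem cnt_head_zero (s : List Int) (h : Int) (hmin : ∀ v ∈ s, h ≤ v) : cnt s.toFinset h = 0 := by
  unfold cnt
  rw [Finset.card_eq_zero, Finset.filter_eq_empty_iff]
  intro v hv
  simp only [List.mem_toFinset] at hv
  exact not_lt.2 (hmin v hv)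

-- A's side: on a sorted list, the adjacency depth-counter loop sums the ranks of the elements
theorem solveLoop_eq_rank_sum (s : List Int) (hs : s.Pairwise (· ≤ ·)) : solveLoop (s.zip s.tail) 0 0 = (s.map (fun x => (cnt s.toFinset x : Int))).sum := by
  induction s with
  | nil => simp [solveLoop]
  | cons h t ih =>
      rcases List.pairwise_cons.1 hs with ⟨hle, ht⟩
      cases t with
      | nil =>
          simp [solveLoop, cnt, Finset.filter_singleton]
      | cons y t' =>
          have hmin : ∀ v ∈ h :: y :: t', h ≤ v := by
            intro v hv
            rcases List.mem_cons.1 hv with rfl | hv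
            · exact le_refl _
            · exact hle v hv
          have ih' := ih ht
          simp only [List.tail_cons] at ih'
          simp only [List.tail_cons, List.zip_cons_cons, solveLoop]
          have hsum0 : ((h :: y :: t').map (fun x => (cnt (h :: y :: t').toFinset x : Int))).sum = ((y :: t').map (fun x => (cnt (h :: y :: t').toFinset x : Int))).sum := by
            have h0 : cnt (h :: y :: t').toFinset h = 0 := cnt_head_zero _ h hmin
            simp only [List.map_cons, List.sum_cons, h0, Nat.cast_zero, zero_add]
          rw [hsum0]
          by_cases hxy : h = y
          · -- h occurs again: the set is unchanged, depth stays 0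
            have hset : (h :: y :: t').toFinset = (y :: t').toFinset := by
              subst hxy; simp
            rw [hset]
            simp only [hxy, ne_eq, not_true_eq_false, if_false, zero_add]
            exact ih'
          · -- h is strictly below everything in the tail
            have hlt : ∀ v ∈ y :: t', h < v := by
              intro v hv
              rcases List.mem_cons.1 hv with rfl | hv
              · exact lt_of_le_of_ne (hle v (by simp)) hxy
              · exact lt_of_lt_of_le (lt_of_le_of_ne (hle y (by simp)) hxy)
                  ((List.pairwise_cons.1 ht).1 v hv)
            have hnotmem : h ∉ (y :: t').toFinset := by
              simp only [List.mem_toFinset]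
              intro hmem
              exact absurd rfl (ne_of_lt (hlt h hmem))
            have hcnt : ∀ x ∈ y :: t', (cnt (h :: y :: t').toFinset x : Int) = (cnt (y :: t').toFinset x : Int) + 1 := by
              intro x hx
              unfold cnt
              have hins : (h :: y :: t').toFinset = insert h (y :: t').toFinset := by simp
              rw [hins, Finset.filter_insert, if_pos (hlt x hx),
                Finset.card_insert_of_notMem (fun hc => hnotmem (Finset.mem_of_mem_filter _ hc))]
              push_cast; ring
            have hmapsum : ((y :: t').map (fun x => (cnt (h :: y :: t').toFinset x : Int))).sum = ((y :: t').map (fun x => (cnt (y :: t').toFinset x : Int))).sum + ((y :: t').length : Int) := by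
              have hadd := List.sum_map_add (l := y :: t') (f := fun x => (cnt (y :: t').toFinset x : Int)) (g := fun _ => (1 : Int))
              rw [List.map_congr_left (fun x hx => hcnt x hx), hadd]
              simp
              omega
            simp only [ne_eq, hxy, not_false_eq_true, if_true, zero_add]
            rw [solveLoop_shift _ 1 1, solveLoop_depth t' y 1, ih', hmapsum]
            simp only [List.length_cons]
            push_cast; ring

-- on a (≤)-sorted list, bisect_left x is the number of entries below x
theorem bisectLeft_eq_filter_len (l : List Int) (x : Int) (hle : l.Pairwise (· ≤ ·)) :
    (l.filter (fun v => decide (v < x))).length = PySem.List.bisectLeft l x := by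
  obtain ⟨hb, hlo, hhi⟩ := PySem.List.bisectLeft_spec l x hle
  conv_lhs => rw [← List.take_append_drop (PySem.List.bisectLeft l x) l]
  rw [List.filter_append, List.length_append]
  have h1 : ((l.take (PySem.List.bisectLeft l x)).filter (fun v => decide (v < x))) = l.take (PySem.List.bisectLeft l x) := by
    apply List.filter_eq_self.2
    intro a ha
    rw [List.mem_take_iff_getElem] at ha
    obtain ⟨i, hi, rfl⟩ := ha
    simp only [decide_eq_true_eq]
    exact hlo i (by omega) (by omega)
  have h2 : ((l.drop (PySem.List.bisectLeft l x)).filter (fun v => decide (v < x))) = [] := by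
    apply List.filter_eq_nil_iff.2
    intro a ha
    rw [List.mem_drop_iff_getElem] at ha
    obtain ⟨i, hi, rfl⟩ := ha
    simp only [decide_eq_true_eq]
    exact not_lt.2 (hhi _ (by omega) (by omega))
  rw [h1, h2]
  simp only [List.length_nil, add_zero]
  rw [List.length_take]
  omega

theorem distinctSorted_toFinset (nums : List Int) : (distinctSorted nums).toFinset = nums.toFinset := by
  apply List.toFinset.ext
  intro v
  unfold distinctSorted
  rw [PySem.List.mem_sorted, PySem.Set.mem_ofList]

theorem bisectLeft_eq_cnt (nums : List Int) (x : Int) : PySem.List.bisectLeft (distinctSorted nums) x = cnt nums.toFinset x := by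
  have hlt : (distinctSorted nums).Pairwise (· < ·) := PySem.List.sorted_ofList_pairwise_lt nums
  have hnd : (distinctSorted nums).Nodup := hlt.imp ne_of_lt
  rw [← bisectLeft_eq_filter_len _ x (hlt.imp le_of_lt)]
  unfold cnt
  rw [← List.toFinset_card_of_nodup (List.Nodup.filter _ hnd), List.toFinset_filter,
    distinctSorted_toFinset]
  congr 2
  simp

theorem solve_alt_eq_rank_sum (nums : List Int) : solve_alt nums = (nums.map (fun x => (cnt nums.toFinset x : Int))).sum := by
  show (nums.map (fun x => (PySem.List.bisectLeft (distinctSorted nums) x : Int))).sum = _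
  congr 1
  apply List.map_congr_left
  intro x _
  rw [bisectLeft_eq_cnt]

-- ===== VERDICT (by name: the statement is the Claim_ definition above) =====
theorem solve_spec : Claim_equal_solve := by
  intro nums _
  unfold Spec_solve solve
  simp only [PySem.List.slice_from_one]
  have hperm : (PySem.List.sorted nums (fun x => x) false).Perm nums := PySem.List.sorted_perm nums _ _
  have hpw : (PySem.List.sorted nums (fun x => x) false).Pairwise (· ≤ ·) := PySem.List.sorted_pairwise nums _
  rw [solveLoop_eq_rank_sum _ hpw, solve_alt_eq_rank_sum,
    List.toFinset_eq_of_perm _ _ hperm]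
  exact List.Perm.sum_eq (hperm.map _)
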